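-- pv_equiv track=rewrite | github.com/thepizzaking/whaawmp | src/common/useful.py | tagsToTuple
-- ===== SOURCE A (Python) =====
-- def tagsToTuple(str):
-- 	## Takes a string and returns a list of eihter (True, *tag*) or (False, *str*)
-- 	tags = []
-- 	# First split the string at { (start of a tag).
-- 	split = str.partition('{')
-- 	while (len(split[1])):
-- 		# While we aren't done.
-- 		# Append the bit before the tag.
-- 		tags.append((False, split[0]))
-- 		# Split at } (end of tag).
-- 		split = split[2].partition('}')
-- 		# Append the tag to the list.
-- 		tags.append((True, split[0]))
-- 		# Split at the { again.
-- 		split = split[2].partition('{')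
-- 	return tags
-- ===== SOURCE B (Python) =====
-- def tagsToTuple(str):
-- 	# Single-pass character state machine instead of repeated partition calls.
-- 	res = []
-- 	buf = []
-- 	in_tag = False
-- 	for ch in str:
-- 		if not in_tag and ch == '{':
-- 			res.append((False, ''.join(buf)))
-- 			buf = []
-- 			in_tag = True
-- 		elif in_tag and ch == '}':
-- 			res.append((True, ''.join(buf)))
-- 			buf = []
-- 			in_tag = False
-- 		else:
-- 			buf.append(ch)
-- 	if in_tag:
-- 		res.append((True, ''.join(buf)))
-- 	return res
-- ===== Notes on version B (the rewrite author's own statement) =====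
-- stated objective: alternative
-- what changed: Replaced A's while-loop of repeated str.partition calls (which rebuilds substrings and a 3-tuple each round) by a single left-to-right character scan with an in_tag state flag and a buffer, appending a (False, text)/(True, tag) pair whenever the state flips.
import Mathlib
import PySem

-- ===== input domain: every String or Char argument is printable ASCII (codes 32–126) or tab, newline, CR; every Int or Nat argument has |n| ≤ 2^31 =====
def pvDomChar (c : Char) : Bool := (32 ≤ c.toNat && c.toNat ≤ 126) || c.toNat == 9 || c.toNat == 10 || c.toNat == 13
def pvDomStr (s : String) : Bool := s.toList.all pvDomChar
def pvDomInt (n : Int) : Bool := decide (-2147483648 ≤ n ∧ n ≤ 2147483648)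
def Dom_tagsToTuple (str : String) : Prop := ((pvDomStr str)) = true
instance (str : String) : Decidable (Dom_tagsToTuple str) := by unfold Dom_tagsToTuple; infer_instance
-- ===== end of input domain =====

-- B replaces A's repeated str.partition loop by a single-pass character state machine
-- (objective: alternative — structurally different, same linear cost; return value only, no mutation).

-- ===== PORT A =====
-- str.partition(c) for a one-character separator, exact: (before, sep, after);
-- sep = "" and after = "" when c does not occur.
def pvPartA (c : Char) (s : List Char) : List Char × List Char × List Char :=
  let pre := s.takeWhile (· ≠ c)
  match s.dropWhile (· ≠ c) with
  | [] => (pre, [], [])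
  | _ :: r => (pre, [c], r)

-- length facts about pvPartA, used only for termination of the loop below
lemma pvPartA_cases (c : Char) (s : List Char) :
    ((pvPartA c s).2.1 = [] ∧ (pvPartA c s).2.2 = []) ∨ (pvPartA c s).2.2.length < s.length := by
  simp only [pvPartA]
  cases hdd : s.dropWhile (· ≠ c) with
  | nil => left; exact ⟨rfl, rfl⟩
  | cons d r =>
    right
    have h1 : (s.dropWhile (· ≠ c)).length ≤ s.length := List.length_dropWhile_le _ _
    rw [hdd] at h1
    simp only [List.length_cons] at h1
    simpa using Nat.lt_of_lt_of_le (Nat.lt_succ_self _) h1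

-- the while-loop of A, state = the current `split` triple
def tagsToTupleGo (split : List Char × List Char × List Char) : List (Bool × List Char) :=
  if split.2.1 = [] then []
  else
    let s2 := pvPartA '}' split.2.2
    let s3 := pvPartA '{' s2.2.2
    (false, split.1) :: (true, s2.1) :: tagsToTupleGo s3
termination_by split.2.2.length + (if split.2.1 = [] then 0 else 1)
decreasing_by
  rename_i hne
  have h1 := pvPartA_cases '}' split.2.2
  have h2 := pvPartA_cases '{' (pvPartA '}' split.2.2).2.2
  simp only [if_neg hne]
  rcases h2 with ⟨h2a, h2b⟩ | h2
  · simp [h2a, h2b]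
  · have hif : (if (pvPartA '{' (pvPartA '}' split.2.2).2.2).2.1 = [] then 0 else 1) ≤ 1 := by
      split <;> omega
    rcases h1 with ⟨_, h1b⟩ | h1
    · rw [h1b] at h2; simp [pvPartA] at h2
    · omega

def tagsToTuple (str : String) : List (Bool × String) :=
  (tagsToTupleGo (pvPartA '{' str.toList)).map (fun p => (p.1, String.ofList p.2))

-- ===== PORT B =====
-- one step of the state machine: state = (res, buf, in_tag)
def pvStepB (st : List (Bool × List Char) × List Char × Bool) (ch : Char) :
    List (Bool × List Char) × List Char × Bool :=
  if st.2.2 = false ∧ ch = '{' then (st.1 ++ [(false, st.2.1)], [], true)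
  else if st.2.2 = true ∧ ch = '}' then (st.1 ++ [(true, st.2.1)], [], false)
  else (st.1, st.2.1 ++ [ch], st.2.2)

def pvFinB (st : List (Bool × List Char) × List Char × Bool) : List (Bool × List Char) :=
  if st.2.2 then st.1 ++ [(true, st.2.1)] else st.1

def tagsToTuple_alt (str : String) : List (Bool × String) :=
  (pvFinB (str.toList.foldl pvStepB ([], [], false))).map (fun p => (p.1, String.ofList p.2))

-- ===== PRECONDITION & SPEC =====
def Spec_tagsToTuple (str : String) (out : List (Bool × String)) : Prop := out = tagsToTuple_alt str
instance (str : String) (out : List (Bool × String)) : Decidable (Spec_tagsToTuple str out) := by unfold Spec_tagsToTuple; infer_instance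

-- ===== CLAIM (what is proved, stated in full; the proofs are below) =====
def Claim_equal_tagsToTuple : Prop := ∀ (str : String), Dom_tagsToTuple str → Spec_tagsToTuple str (tagsToTuple str)

-- ===== LEMMAS AND PROOFS =====

-- abstract runs of B's state machine from the `false` / `true` state with a pending buffer
mutual
def pvG0 (buf : List Char) : List Char → List (Bool × List Char)
  | [] => []
  | c :: t => if c = '{' then (false, buf) :: pvG1 [] t else pvG0 (buf ++ [c]) t

def pvG1 (buf : List Char) : List Char → List (Bool × List Char)
  | [] => [(true, buf)]
  | c :: t => if c = '}' then (true, buf) :: pvG0 [] t else pvG1 (buf ++ [c]) t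
end

lemma pvFold_g (s : List Char) : ∀ (res : List (Bool × List Char)) (buf : List Char),
    pvFinB (s.foldl pvStepB (res, buf, false)) = res ++ pvG0 buf s ∧
    pvFinB (s.foldl pvStepB (res, buf, true)) = res ++ pvG1 buf s := by
  induction s with
  | nil => intro res buf; simp [pvFinB, pvG0, pvG1]
  | cons c t ih =>
    intro res buf
    constructor
    · simp only [List.foldl_cons, pvStepB, pvG0]
      by_cases h : c = '{'
      · simp [h, (ih _ _).2]
      · simp [h, (ih _ _).1]
    · simp only [List.foldl_cons, pvStepB, pvG1]
      by_cases h : c = '}'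
      · simp [h, (ih _ _).1]
      · simp [h, (ih _ _).2]

lemma pvG0_spec (s : List Char) : ∀ buf, pvG0 buf s =
    if s.dropWhile (· ≠ '{') = [] then []
    else (false, buf ++ s.takeWhile (· ≠ '{')) :: pvG1 [] (s.dropWhile (· ≠ '{')).tail := by
  induction s with
  | nil => intro buf; simp [pvG0]
  | cons c t ih =>
    intro buf
    by_cases h : c = '{'
    · simp [pvG0, h, List.dropWhile, List.takeWhile]
    · simp [pvG0, h, List.dropWhile, List.takeWhile, ih]

lemma pvG1_spec (s : List Char) : ∀ buf, pvG1 buf s =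
    (true, buf ++ s.takeWhile (· ≠ '}')) :: pvG0 [] (s.dropWhile (· ≠ '}')).tail := by
  induction s with
  | nil => intro buf; simp [pvG1, pvG0]
  | cons c t ih =>
    intro buf
    by_cases h : c = '}'
    · simp [pvG1, h, List.dropWhile, List.takeWhile]
    · simp [pvG1, h, List.dropWhile, List.takeWhile, ih]

lemma pvG0_eq_go : ∀ (n : ℕ) (s : List Char), s.length ≤ n →
    pvG0 [] s = tagsToTupleGo (pvPartA '{' s) := by
  intro n
  induction n with
  | zero =>
    intro s hs
    have : s = [] := List.length_eq_zero_iff.mp (Nat.le_zero.mp hs)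
    subst this
    rw [tagsToTupleGo.eq_def]
    simp [pvG0, pvPartA]
  | succ n ih =>
    intro s hs
    rw [pvG0_spec]
    by_cases hd : s.dropWhile (· ≠ '{') = []
    · rw [tagsToTupleGo.eq_def]
      simp only [ne_eq, decide_not] at hd
      simp [pvPartA, hd]
    · obtain ⟨c, r, hr⟩ := List.exists_cons_of_ne_nil hd
      have htail : (s.dropWhile (· ≠ '{')).tail = r := by rw [hr]; rfl
      have hlen1 : (s.dropWhile (· ≠ '{')).length ≤ s.length :=
        List.length_dropWhile_le _ _
      have hlen2 : r.length < s.length := by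
        rw [hr] at hlen1; simp at hlen1; omega
      have hlen3 : ((r.dropWhile (· ≠ '}')).tail).length ≤ r.length := by
        have h1 : ((r.dropWhile (· ≠ '}'))).length ≤ r.length :=
          List.length_dropWhile_le _ _
        simp only [List.length_tail]
        omega
      rw [tagsToTupleGo.eq_def, htail, pvG1_spec,
          ih ((r.dropWhile (· ≠ '}')).tail) (by omega)]
      simp only [ne_eq, decide_not] at hr
      simp only [pvPartA, ne_eq, decide_not, hr]
      cases hdd : r.dropWhile (· ≠ '}') with
      | nil =>
        simp only [ne_eq, decide_not] at hdd
        simp [hdd]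
      | cons d rr =>
        simp only [ne_eq, decide_not] at hdd
        simp [hdd]

-- ===== VERDICT (by name: the statement is the Claim_ definition above) =====
theorem tagsToTuple_spec : Claim_equal_tagsToTuple := by
  unfold Claim_equal_tagsToTuple
  intro s _
  unfold Spec_tagsToTuple tagsToTuple tagsToTuple_alt
  rw [(pvFold_g s.toList [] []).1,
      pvG0_eq_go s.toList.length s.toList le_rfl]
  rfl
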